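-- pv_equiv track=rewrite | github.com/shft1/Algorithms-Structures-Tasks | Marathon 8.0/Party 5-6/G. Суперструнная гравитация*/solution.py | sum_for_bj
-- ===== SOURCE A (Python) =====
-- from bisect import bisect_right
--
-- def sum_for_bj(m, bj, n, sort_ai, prfx_sum_ai):
--     sj = 0
--     for j in range(m):
--         insert_idx = bisect_right(sort_ai, bj[j])
--         K2, Q2 = insert_idx, n - insert_idx
--         sum_ak2 = prfx_sum_ai[insert_idx]
--         sum_aq2 = prfx_sum_ai[n] - prfx_sum_ai[insert_idx]
--         sj += (j + 1) * (bj[j] * (K2 - Q2) + sum_aq2 - sum_ak2)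
--     return sj
-- ===== SOURCE B (Python) =====
-- from bisect import bisect_right
--
-- def sum_for_bj(m, bj, n, sort_ai, prfx_sum_ai):
--     weight = {}
--     for j in range(m):
--         weight[bj[j]] = weight.get(bj[j], 0) + (j + 1)
--     total = 0
--     for v, w in weight.items():
--         k = bisect_right(sort_ai, v)
--         total += w * (v * (2 * k - n) + prfx_sum_ai[n] - 2 * prfx_sum_ai[k])
--     return total
-- ===== Notes on version B (the rewrite author's own statement) =====
-- stated objective: alternative
-- what changed: B first groups the queries in one dict pass (value -> sum of its 1-based query indices) and then runs a single bisect_right and prefix-sum evaluation per DISTINCT query value, with the per-value arithmetic folded to w*(v*(2k-n)+prfx[n]-2*prfx[k]), instead of A's bisect and term per query.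
import Mathlib
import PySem

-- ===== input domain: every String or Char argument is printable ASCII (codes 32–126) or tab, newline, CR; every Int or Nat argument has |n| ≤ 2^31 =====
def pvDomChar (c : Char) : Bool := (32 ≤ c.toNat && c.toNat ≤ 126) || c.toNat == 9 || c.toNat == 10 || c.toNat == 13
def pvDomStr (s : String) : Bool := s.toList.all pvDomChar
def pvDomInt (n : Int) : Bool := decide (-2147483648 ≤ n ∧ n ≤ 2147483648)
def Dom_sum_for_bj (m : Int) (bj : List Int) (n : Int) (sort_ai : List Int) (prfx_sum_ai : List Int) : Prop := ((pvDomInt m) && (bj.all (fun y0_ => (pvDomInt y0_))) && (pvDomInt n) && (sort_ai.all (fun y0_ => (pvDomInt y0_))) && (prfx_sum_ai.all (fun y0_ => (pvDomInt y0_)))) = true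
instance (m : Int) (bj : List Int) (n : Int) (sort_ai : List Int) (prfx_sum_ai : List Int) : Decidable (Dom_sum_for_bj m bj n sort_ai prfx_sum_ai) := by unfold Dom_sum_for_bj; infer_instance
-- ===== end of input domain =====

-- B groups the queries by value in a dict (value → summed 1-based index weight) and then does one
-- bisect_right per DISTINCT value, instead of A's bisect and term per query; same return value.

-- ===== PORT A =====
def sum_for_bj (m : Int) (bj : List Int) (n : Int) (sort_ai : List Int) (prfx_sum_ai : List Int) : Int :=
  (PySem.List.pyRange 0 m 1).foldl (fun sj j =>
    let bjj := PySem.List.pyGetD bj j 0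
    let insert_idx : Int := (PySem.List.bisectRight sort_ai bjj : Int)
    let K2 := insert_idx
    let Q2 := n - insert_idx
    let sum_ak2 := PySem.List.pyGetD prfx_sum_ai insert_idx 0
    let sum_aq2 := PySem.List.pyGetD prfx_sum_ai n 0 - PySem.List.pyGetD prfx_sum_ai insert_idx 0
    sj + (j + 1) * (bjj * (K2 - Q2) + sum_aq2 - sum_ak2)) 0

-- ===== PORT B =====
def sum_for_bj_alt (m : Int) (bj : List Int) (n : Int) (sort_ai : List Int) (prfx_sum_ai : List Int) : Int :=
  let weight := (PySem.List.pyRange 0 m 1).foldl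
    (fun (d : PySem.Dict Int Int) j =>
      d.insert (PySem.List.pyGetD bj j 0) (d.getD (PySem.List.pyGetD bj j 0) 0 + (j + 1)))
    PySem.Dict.empty
  weight.items.foldl (fun total p =>
    let k : Int := (PySem.List.bisectRight sort_ai p.1 : Int)
    total + p.2 * (p.1 * (2 * k - n) + PySem.List.pyGetD prfx_sum_ai n 0
                    - 2 * PySem.List.pyGetD prfx_sum_ai k 0)) 0

-- ===== PRECONDITION & SPEC =====
-- Pre_ holds exactly where the Python A returns (no IndexError): every queried position of bj
-- exists, prfx_sum_ai[n] is a valid (possibly negative) Python index when the loop runs at all,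
-- and each insertion point read from prfx_sum_ai is in range.  bisectRight here only names the
-- index A reads (index validity), it is PySem's stdlib primitive, not a re-run of A's loop.
def Pre_sum_for_bj (m : Int) (bj : List Int) (n : Int) (sort_ai : List Int) (prfx_sum_ai : List Int) : Prop :=
  m ≤ (bj.length : Int) ∧
  (0 < m → PySem.Raise.InRange prfx_sum_ai.length n) ∧
  (∀ j ∈ PySem.List.pyRange 0 m 1,
    ((PySem.List.bisectRight sort_ai (PySem.List.pyGetD bj j 0) : Int) < (prfx_sum_ai.length : Int)))
instance (m : Int) (bj : List Int) (n : Int) (sort_ai : List Int) (prfx_sum_ai : List Int) : Decidable (Pre_sum_for_bj m bj n sort_ai prfx_sum_ai) := by unfold Pre_sum_for_bj; infer_instance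

def pvWitness_sum_for_bj : Int × List Int × Int × List Int × List Int :=
  (2, [1, 3], 2, [1, 2], [0, 1, 3])

def Spec_sum_for_bj (m : Int) (bj : List Int) (n : Int) (sort_ai : List Int) (prfx_sum_ai : List Int) (out : Int) : Prop := out = sum_for_bj_alt m bj n sort_ai prfx_sum_ai
instance (m : Int) (bj : List Int) (n : Int) (sort_ai : List Int) (prfx_sum_ai : List Int) (out : Int) : Decidable (Spec_sum_for_bj m bj n sort_ai prfx_sum_ai out) := by unfold Spec_sum_for_bj; infer_instance

-- ===== CLAIM (what is proved, stated in full; the proofs are below) =====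
def Claim_equal_sum_for_bj : Prop := ∀ (m : Int) (bj : List Int) (n : Int) (sort_ai : List Int) (prfx_sum_ai : List Int), Dom_sum_for_bj m bj n sort_ai prfx_sum_ai → Pre_sum_for_bj m bj n sort_ai prfx_sum_ai → Spec_sum_for_bj m bj n sort_ai prfx_sum_ai (sum_for_bj m bj n sort_ai prfx_sum_ai)

-- ===== LEMMAS AND PROOFS =====

-- the common per-value term: v's contribution per unit of weight
def pvG (n : Int) (sort_ai : List Int) (prfx_sum_ai : List Int) (v : Int) : Int :=
  v * (2 * (PySem.List.bisectRight sort_ai v : Int) - n)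
    + PySem.List.pyGetD prfx_sum_ai n 0
    - 2 * PySem.List.pyGetD prfx_sum_ai (PySem.List.bisectRight sort_ai v : Int) 0

theorem pvA_eq (m : Int) (bj : List Int) (n : Int) (sort_ai : List Int) (prfx_sum_ai : List Int) :
    sum_for_bj m bj n sort_ai prfx_sum_ai
      = ((PySem.List.pyRange 0 m 1).map
          (fun j => (j + 1) * pvG n sort_ai prfx_sum_ai (PySem.List.pyGetD bj j 0))).sum := by
  unfold sum_for_bj
  rw [PySem.List.foldl_congr_mem' _ _
        (fun sj j => sj + (j + 1) * pvG n sort_ai prfx_sum_ai (PySem.List.pyGetD bj j 0)) _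
        (by intro j _ acc; simp only [pvG]; ring)]
  rw [PySem.List.foldl_add]
  ring

-- the weight dict's lookup: sum of w over the occurrences of v among the keys
theorem pvGetD_weight (l : List Int) (key w : Int → Int) (d : PySem.Dict Int Int) (v : Int) :
    ((l.foldl (fun d j => d.insert (key j) (d.getD (key j) 0 + w j)) d).getD v 0)
      = d.getD v 0 + ((l.filter (fun j => key j == v)).map w).sum := by
  induction l generalizing d with
  | nil => simp
  | cons j l ih =>
    simp only [List.foldl_cons, List.filter_cons]
    rw [ih]
    by_cases h : key j = v
    · simp only [h, BEq.rfl, if_true, List.map_cons, List.sum_cons,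
        PySem.Dict.getD_insert]
      ring
    · have hb : (key j == v) = false := by simpa using h
      have h2 : v ≠ key j := Ne.symm h
      simp [hb, PySem.Dict.getD_insert, h2]

-- sum of an indicator over a duplicate-free list
theorem pvIndicator (V : List Int) (k : Int) (c : Int → Int) (hnd : V.Nodup) (hk : k ∈ V) :
    (V.map (fun v => if k = v then c v else 0)).sum = c k := by
  induction V with
  | nil => cases hk
  | cons v V ih =>
    obtain ⟨hv, hndV⟩ := List.nodup_cons.mp hnd
    simp only [List.map_cons, List.sum_cons]
    rcases List.mem_cons.mp hk with h | h
    · subst h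
      rw [if_pos rfl, List.sum_eq_zero, add_zero]
      intro x hx
      obtain ⟨v', hv', rfl⟩ := List.mem_map.mp hx
      exact if_neg (by rintro rfl; exact hv hv')
    · rw [if_neg (by rintro rfl; exact hv h), ih hndV h, zero_add]

-- group-by: summing weights per distinct value and multiplying once is the plain weighted sum
theorem pvGroup (l : List Int) (key g w : Int → Int) (V : List Int)
    (hnd : V.Nodup) (hmem : ∀ j ∈ l, key j ∈ V) :
    (V.map (fun v => ((l.filter (fun j => key j == v)).map w).sum * g v)).sum
      = (l.map (fun j => w j * g (key j))).sum := by
  induction l with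
  | nil => simp
  | cons j l ih =>
    have hstep : ∀ v : Int,
        (((j :: l).filter (fun i => key i == v)).map w).sum * g v
          = (if key j = v then w j * g v else 0)
            + ((l.filter (fun i => key i == v)).map w).sum * g v := by
      intro v
      by_cases h : key j = v
      · simp only [List.filter_cons, h, BEq.rfl, if_true, List.map_cons, List.sum_cons]
        ring
      · have hb : (key j == v) = false := by simpa using h
        simp [hb, h]
    simp only [hstep]
    rw [PySem.List.sum_map_add_int]
    have h1 : (V.map (fun v => if key j = v then w j * g v else 0)).sum
        = w j * g (key j) :=
      pvIndicator V (key j) (fun v => w j * g v) hnd (hmem j (List.mem_cons_self ..))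
    rw [h1, ih (fun i hi => hmem i (List.mem_cons_of_mem _ hi))]
    simp

theorem pvB_eq (m : Int) (bj : List Int) (n : Int) (sort_ai : List Int) (prfx_sum_ai : List Int) :
    sum_for_bj_alt m bj n sort_ai prfx_sum_ai
      = ((PySem.List.pyRange 0 m 1).map
          (fun j => (j + 1) * pvG n sort_ai prfx_sum_ai (PySem.List.pyGetD bj j 0))).sum := by
  unfold sum_for_bj_alt
  set l := PySem.List.pyRange 0 m 1 with hl
  set key : Int → Int := fun j => PySem.List.pyGetD bj j 0 with hkey
  set wght : Int → Int := fun j => j + 1 with hw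
  set d := l.foldl (fun (d : PySem.Dict Int Int) j =>
      d.insert (key j) (d.getD (key j) 0 + (j + 1))) PySem.Dict.empty with hd
  have hnd : d.keys.Nodup := by
    rw [hd]
    exact PySem.Dict.nodup_keys_foldl_insert_key l key _ _ PySem.Dict.nodup_keys_empty
  have hkeys : d.keys = PySem.Set.ofList (l.map key) := by
    rw [hd, PySem.Dict.keys_foldl_insert_key, PySem.Dict.keys_empty,
      PySem.Set.update_nil_left]
  -- the reporting fold is a sum over the dict's items
  rw [PySem.List.foldl_congr_mem' _ _
        (fun total (p : Int × Int) => total + p.2 * pvG n sort_ai prfx_sum_ai p.1) _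
        (by intro p _ acc; simp only [pvG])]
  rw [PySem.List.foldl_add, zero_add]
  rw [PySem.Dict.items_eq_map_keys d hnd 0, hkeys, List.map_map]
  have hval : ∀ v : Int, d.getD v 0 = ((l.filter (fun j => key j == v)).map wght).sum := by
    intro v
    rw [hd, pvGetD_weight l key wght PySem.Dict.empty v, PySem.Dict.getD_empty, zero_add]
  have hmap : (PySem.Set.ofList (l.map key)).map
        ((fun (p : Int × Int) => p.2 * pvG n sort_ai prfx_sum_ai p.1) ∘ (fun k => (k, d.getD k 0)))
      = (PySem.Set.ofList (l.map key)).map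
        (fun v => ((l.filter (fun j => key j == v)).map wght).sum * pvG n sort_ai prfx_sum_ai v) := by
    refine List.map_congr_left ?_
    intro v _
    simp only [Function.comp_apply, hval v]
  rw [hmap]
  rw [pvGroup l key (pvG n sort_ai prfx_sum_ai) wght (PySem.Set.ofList (l.map key))
        (PySem.Set.nodup_ofList _)
        (fun j hj => (PySem.Set.mem_ofList ..).mpr (List.mem_map_of_mem hj))]

-- ===== VERDICT (by name: the statement is the Claim_ definition above) =====
theorem sum_for_bj_spec : Claim_equal_sum_for_bj := by
  intro m bj n sort_ai prfx_sum_ai _hdom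
  intro _hpre
  unfold Spec_sum_for_bj
  rw [pvA_eq, pvB_eq]
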